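-- pv_equiv track=rewrite | github.com/MIMUW-RL/Unified-Long-Horizon-Time-Series-Benchmark | src/configurations/common.py | mlp_layers
-- ===== SOURCE A (Python) =====
-- def mlp_layers(in_dim, out_dim, width, depth):
--     if depth < 0:
--         raise ValueError("")
--     elif depth == 0:
--         return [
--             (
--                 in_dim,
--                 out_dim,
--             )
--         ]
--     else:
--         layers = [
--             (
--                 in_dim,
--                 width,
--             )
--         ]
--         layers += [(width, width) for _ in range(depth - 1)]
--         layers.append(
--             (
--                 width,
--                 out_dim,
--             )
--         )
--
--         return layers
-- ===== SOURCE B (Python) =====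
-- def mlp_layers(in_dim, out_dim, width, depth):
--     if depth < 0:
--         raise ValueError("")
--     dims = [in_dim] + [width] * depth + [out_dim]
--     return list(zip(dims[:-1], dims[1:]))
-- ===== Notes on version B (the rewrite author's own statement) =====
-- stated objective: simpler
-- what changed: B builds the single dimension list [in_dim] + [width]*depth + [out_dim] and zips consecutive entries, replacing A's three-way branch and list concatenations.
import Mathlib
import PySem

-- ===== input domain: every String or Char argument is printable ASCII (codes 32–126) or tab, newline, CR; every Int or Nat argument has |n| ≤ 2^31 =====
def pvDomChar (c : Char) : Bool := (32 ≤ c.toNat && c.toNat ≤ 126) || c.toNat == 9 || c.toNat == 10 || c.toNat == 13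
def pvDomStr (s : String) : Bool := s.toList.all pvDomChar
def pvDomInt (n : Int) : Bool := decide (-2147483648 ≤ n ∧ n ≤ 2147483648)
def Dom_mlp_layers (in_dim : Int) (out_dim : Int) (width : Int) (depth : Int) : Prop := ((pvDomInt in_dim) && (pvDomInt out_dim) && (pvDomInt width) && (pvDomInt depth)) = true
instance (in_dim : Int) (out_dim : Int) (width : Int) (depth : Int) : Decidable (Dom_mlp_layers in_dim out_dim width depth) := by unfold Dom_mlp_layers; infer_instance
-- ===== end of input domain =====

-- B replaces A's three-way branch and concatenations by zipping consecutive
-- entries of the single dimension list [in_dim] + [width]*depth + [out_dim] (objective: simpler).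

-- ===== PORT A =====
def mlp_layers (in_dim : Int) (out_dim : Int) (width : Int) (depth : Int) : List (Int × Int) :=
  if depth < 0 then []  -- Python raises ValueError here; excluded by Pre_
  else if depth = 0 then [(in_dim, out_dim)]
  else
    let layers := [(in_dim, width)]
    let layers := layers ++ (PySem.List.pyRange 0 (depth - 1) 1).map (fun _ => (width, width))
    layers ++ [(width, out_dim)]

-- ===== PORT B =====
def mlp_layers_alt (in_dim : Int) (out_dim : Int) (width : Int) (depth : Int) : List (Int × Int) :=
  if depth < 0 then []  -- Python raises ValueError here; excluded by Pre_
  else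
    let dims := [in_dim] ++ List.replicate depth.toNat width ++ [out_dim]
    List.zip dims.dropLast dims.tail

-- ===== PRECONDITION & SPEC =====
-- Pre_ excludes exactly depth < 0, where the Python A (and B) raise ValueError.
def Pre_mlp_layers (in_dim : Int) (out_dim : Int) (width : Int) (depth : Int) : Prop := 0 ≤ depth
instance (in_dim : Int) (out_dim : Int) (width : Int) (depth : Int) : Decidable (Pre_mlp_layers in_dim out_dim width depth) := by unfold Pre_mlp_layers; infer_instance
def pvWitness_mlp_layers : Int × Int × Int × Int := (4, 2, 8, 3)

def Spec_mlp_layers (in_dim : Int) (out_dim : Int) (width : Int) (depth : Int) (out : List (Int × Int)) : Prop := out = mlp_layers_alt in_dim out_dim width depth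
instance (in_dim : Int) (out_dim : Int) (width : Int) (depth : Int) (out : List (Int × Int)) : Decidable (Spec_mlp_layers in_dim out_dim width depth out) := by unfold Spec_mlp_layers; infer_instance

-- ===== CLAIM =====
def Claim_equal_mlp_layers : Prop := ∀ (in_dim : Int) (out_dim : Int) (width : Int) (depth : Int), Dom_mlp_layers in_dim out_dim width depth → Pre_mlp_layers in_dim out_dim width depth → Spec_mlp_layers in_dim out_dim width depth (mlp_layers in_dim out_dim width depth)

-- ===== LEMMAS AND PROOFS =====
theorem zip_replicate_cons (w o : Int) (n : Nat) :
    List.zip (w :: List.replicate n w) (List.replicate n w ++ [o])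
      = List.replicate n (w, w) ++ [(w, o)] := by
  induction n with
  | zero => simp
  | succ m ih =>
    simp only [List.replicate_succ, List.cons_append, List.zip_cons_cons]
    rw [ih]

theorem mlp_layers_spec : Claim_equal_mlp_layers := by
  intro in_dim out_dim width depth _ hpre
  unfold Spec_mlp_layers mlp_layers mlp_layers_alt
  have hnl : ¬ depth < 0 := not_lt.mpr hpre
  simp only [if_neg hnl]
  by_cases h0 : depth = 0
  · subst h0; simp
  · have hpos : 0 < depth := lt_of_le_of_ne hpre (Ne.symm h0)
    simp only [if_neg h0]
    obtain ⟨m, hm⟩ : ∃ m : Nat, depth.toNat = m + 1 :=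
      ⟨depth.toNat - 1, by omega⟩
    have hmap : (PySem.List.pyRange 0 (depth - 1) 1).map (fun _ => ((width : Int), width))
        = List.replicate m ((width : Int), width) := by
      rw [PySem.List.pyRange_one, List.map_map]
      have : ((depth - 1) - 0).toNat = m := by omega
      rw [this]
      simp [Function.comp_def, List.map_const']
    have hdims : ([in_dim] ++ List.replicate depth.toNat width ++ [out_dim] : List Int)
        = in_dim :: (List.replicate (m+1) width ++ [out_dim]) := by
      rw [hm]; simp
    rw [hmap, hdims]
    have hdl : (in_dim :: (List.replicate (m+1) width ++ [out_dim])).dropLast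
        = in_dim :: List.replicate (m+1) width := by
      rw [show in_dim :: (List.replicate (m+1) width ++ [out_dim])
            = (in_dim :: List.replicate (m+1) width) ++ [out_dim] by simp,
          List.dropLast_concat]
    rw [hdl]
    simp only [List.tail_cons, List.replicate_succ, List.cons_append, List.zip_cons_cons]
    rw [zip_replicate_cons]
    simp
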